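-- pv_equiv track=rewrite | github.com/oussema18/DeltaDebugging | helper.py | format_tokens
-- ===== SOURCE A (Python) =====
-- def format_tokens(tokens):
--     # Group the elements by their positions
--     groups = {}
--     for pos, value in tokens:
--         groups.setdefault(pos, []).append(value)
--
--     # Merge consecutive elements
--     merged = []
--     for key in sorted(groups.keys()):
--         if groups[key] != [" "]:
--             merged.append("".join(groups[key]))
--     return merged
-- ===== SOURCE B (Python) =====
-- def format_tokens(tokens):
--     # Dict-free: sort the distinct positions once, then collect each position's
--     # values by a filtering pass over the original list (first-appearance order).
--     out = []
--     for pos in sorted({p for p, _ in tokens}):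
--         vals = [v for p, v in tokens if p == pos]
--         if vals != [" "]:
--             out.append("".join(vals))
--     return out
-- ===== Notes on version B (the rewrite author's own statement) =====
-- stated objective: alternative
-- what changed: Replaces the dict-of-lists grouping plus sorted-keys loop by a single loop over the sorted distinct positions that collects each position's values with a filtering comprehension over the input.
import Mathlib
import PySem

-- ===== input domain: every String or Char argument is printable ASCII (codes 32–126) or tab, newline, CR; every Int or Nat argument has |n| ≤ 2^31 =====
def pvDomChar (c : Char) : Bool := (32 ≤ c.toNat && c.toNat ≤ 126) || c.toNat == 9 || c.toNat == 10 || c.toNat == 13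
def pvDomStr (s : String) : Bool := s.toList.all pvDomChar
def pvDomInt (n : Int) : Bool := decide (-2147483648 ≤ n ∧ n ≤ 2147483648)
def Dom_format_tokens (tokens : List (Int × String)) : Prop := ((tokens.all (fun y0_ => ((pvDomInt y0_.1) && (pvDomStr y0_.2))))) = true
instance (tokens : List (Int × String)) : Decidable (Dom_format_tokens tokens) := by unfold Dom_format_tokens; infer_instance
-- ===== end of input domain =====

-- B replaces A's dict grouping + sorted-keys loop by one loop over the sorted distinct
-- positions with a filtering pass per position (alternative decomposition, same values).

-- ===== PORT A =====
-- groups.setdefault(pos, []).append(value)  ≡  groups[pos] = groups.get(pos, []) + [value]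
def format_tokens (tokens : List (Int × String)) : List String :=
  let groups : PySem.Dict Int (List String) :=
    tokens.foldl (fun d p => d.modify p.1 [] (· ++ [p.2])) PySem.Dict.empty
  (PySem.List.sorted groups.keys (fun k => k) false).foldl
    (fun merged k =>
      if groups.getD k [] ≠ [" "] then merged ++ [PySem.Str.join "" (groups.getD k [])]
      else merged) []

-- ===== PORT B =====
def format_tokens_alt (tokens : List (Int × String)) : List String :=
  (PySem.List.sorted (PySem.Set.ofList (tokens.map (·.1))) (fun k => k) false).foldl
    (fun out pos =>
      let vals := (tokens.filter (fun p => p.1 == pos)).map (·.2)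
      if vals ≠ [" "] then out ++ [PySem.Str.join "" vals] else out) []

-- ===== PRECONDITION & SPEC =====
def Spec_format_tokens (tokens : List (Int × String)) (out : List String) : Prop := out = format_tokens_alt tokens
instance (tokens : List (Int × String)) (out : List String) : Decidable (Spec_format_tokens tokens out) := by unfold Spec_format_tokens; infer_instance

-- ===== CLAIM (what is proved, stated in full; the proofs are below) =====
def Claim_equal_format_tokens : Prop := ∀ (tokens : List (Int × String)), Dom_format_tokens tokens → Spec_format_tokens tokens (format_tokens tokens)

-- ===== LEMMAS AND PROOFS =====

-- ===== VERDICT (by name: the statement is the Claim_ definition above) =====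
theorem format_tokens_spec : Claim_equal_format_tokens := by
  intro tokens _
  unfold Spec_format_tokens format_tokens format_tokens_alt
  have hg : ∀ k : Int,
      (tokens.foldl (fun d p => d.modify p.1 [] (· ++ [p.2]))
        (PySem.Dict.empty : PySem.Dict Int (List String))).getD k []
        = (tokens.filter (fun p => p.1 == k)).map (·.2) := by
    intro k
    rw [PySem.Dict.getD_foldl_modify_append]
    simp [PySem.Dict.getD_empty]
  have hk :
      (tokens.foldl (fun d p => d.modify p.1 [] (· ++ [p.2]))
        (PySem.Dict.empty : PySem.Dict Int (List String))).keys
        = PySem.Set.ofList (tokens.map (·.1)) := by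
    rw [PySem.Dict.keys_foldl_modify_key]
    rfl
  simp only [hg, hk]
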